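-- pv_equiv track=rewrite | github.com/ukaji3/exstruct | src/exstruct/core/backends/libreoffice_backend.py | _match_by_name_then_order
-- ===== SOURCE A (Python) =====
-- from collections.abc import Callable, Sequence
--
-- def _match_by_name_then_order(
--     snapshot_names: Sequence[str],
--     candidate_names: Sequence[str],
-- ) -> list[int | None]:
--     """Match snapshot names to candidate names by name first, then by order."""
--
--     matches: list[int | None] = [None] * len(snapshot_names)
--     unused = list(range(len(candidate_names)))
--
--     for index, snapshot_name in enumerate(snapshot_names):
--         matched_index = next(
--             (
--                 candidate_index
--                 for candidate_index in unused
--                 if candidate_names[candidate_index] == snapshot_name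
--             ),
--             None,
--         )
--         if matched_index is None:
--             continue
--         matches[index] = matched_index
--         unused.remove(matched_index)
--
--     remaining_snapshot_indexes = [
--         index for index, match in enumerate(matches) if match is None
--     ]
--     if remaining_snapshot_indexes:
--         for snapshot_index, candidate_index in zip(
--             remaining_snapshot_indexes, unused, strict=False
--         ):
--             matches[snapshot_index] = candidate_index
--
--     return matches
-- ===== SOURCE B (Python) =====
-- def _match_by_name_then_order(snapshot_names, candidate_names):
--     """Match snapshot names to candidate names by name first, then by order."""
--     # Queue of candidate indices per name, built in one pass.
--     queues = {}
--     for i, name in enumerate(candidate_names):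
--         queues.setdefault(name, []).append(i)
--     # Reverse each queue once so that .pop() takes the front (smallest index) in O(1).
--     queues = {name: idxs[::-1] for name, idxs in queues.items()}
--     matches = []
--     for name in snapshot_names:
--         q = queues.get(name)
--         if q:
--             matches.append(q.pop())
--         else:
--             matches.append(None)
--     used = {m for m in matches if m is not None}
--     leftovers = (i for i in range(len(candidate_names)) if i not in used)
--     return [m if m is not None else next(leftovers, None) for m in matches]
-- ===== Notes on version B (the rewrite author's own statement) =====
-- stated objective: faster
-- what changed: Replaces A's per-snapshot linear scan of the unused list (and list.remove) with a dict name->queue of candidate indices built in one pass (pop front per snapshot), then fills the remaining None slots left to right from a single range scan over a used-set.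
import Mathlib
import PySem

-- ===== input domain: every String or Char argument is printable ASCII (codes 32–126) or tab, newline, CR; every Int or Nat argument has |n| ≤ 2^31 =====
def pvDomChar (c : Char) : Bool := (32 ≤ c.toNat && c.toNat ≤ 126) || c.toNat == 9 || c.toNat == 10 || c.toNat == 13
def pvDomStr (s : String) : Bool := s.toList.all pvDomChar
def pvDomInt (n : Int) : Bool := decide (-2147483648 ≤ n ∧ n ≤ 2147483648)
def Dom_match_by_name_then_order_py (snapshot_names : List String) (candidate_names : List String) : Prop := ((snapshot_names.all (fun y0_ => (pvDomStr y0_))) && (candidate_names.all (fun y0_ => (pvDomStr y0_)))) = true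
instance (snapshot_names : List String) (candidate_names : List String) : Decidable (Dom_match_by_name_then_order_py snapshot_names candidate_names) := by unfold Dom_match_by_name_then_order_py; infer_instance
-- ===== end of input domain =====

-- B replaces A's per-snapshot linear scan of the unused list by a dict name→queue of
-- candidate indices built once (pop front per snapshot) plus a single range scan for
-- the leftovers: an asymptotically faster (O(n+m) vs O(n*m)) exact re-implementation.


-- ===== PORT A =====
-- first pass: 'for index, snapshot_name in enumerate(snapshot_names): …'.
-- candidate_names[ci] is ported as pyGetD (ci is always an in-range index, no IndexError);
-- unused.remove(mi) via PySem.List.remove? with getD (mi ∈ unused, so ValueError unreachable).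
def pvALoop (cands : List String) : List String → Nat → List (Option Int) → List Int → (List (Option Int) × List Int)
  | [], _, ms, unused => (ms, unused)
  | sname :: rest, idx, ms, unused =>
    match unused.find? (fun ci => PySem.List.pyGetD cands ci "" == sname) with
    | none => pvALoop cands rest (idx + 1) ms unused
    | some mi => pvALoop cands rest (idx + 1) (ms.set idx (some mi))
        ((PySem.List.remove? unused mi).getD unused)

-- second pass: 'for snapshot_index, candidate_index in zip(remaining, unused): matches[snapshot_index] = candidate_index'
-- (snapshot_index is a nonnegative enumerate index, so .toNat is exact)
def pvAScatter (pairs : List (Int × Int)) (ms : List (Option Int)) : List (Option Int) :=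
  pairs.foldl (fun acc p => acc.set p.1.toNat (some p.2)) ms

def match_by_name_then_order_py (snapshot_names : List String) (candidate_names : List String) : List (Option Int) :=
  let matches0 : List (Option Int) := List.replicate snapshot_names.length none
  let unused0 : List Int := PySem.List.pyRange 0 (candidate_names.length : Int) 1
  let st := pvALoop candidate_names snapshot_names 0 matches0 unused0
  let remaining : List Int := ((PySem.List.enumerate st.1).filter (fun p => p.2 == (none : Option Int))).map (·.1)
  if remaining = [] then st.1 else pvAScatter (remaining.zip st.2) st.1

-- ===== PORT B =====
-- build pass: 'queues.setdefault(name, []).append(i)'  ==  modify name [] (· ++ [i])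
def pvBBuild (cands : List String) : PySem.Dict String (List Int) :=
  (PySem.List.enumerate cands).foldl (fun d p => d.modify p.2 [] (· ++ [p.1])) PySem.Dict.empty

-- the dict comprehension '{name: idxs[::-1] for name, idxs in queues.items()}' (idxs[::-1] = reverse)
def pvBRev (d : PySem.Dict String (List Int)) : PySem.Dict String (List Int) :=
  d.items.foldl (fun acc p => acc.insert p.1 p.2.reverse) PySem.Dict.empty

-- consume pass: 'q = queues.get(name); if q: ms.append(q.pop()) else: ms.append(None)'
-- (q absent or empty both mean 'no pop'; q.pop() = PySem.List.pop? q, mutating q = insert of the rest)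
def pvBLoop : List String → List (Option Int) → PySem.Dict String (List Int) → (List (Option Int) × PySem.Dict String (List Int))
  | [], out, d => (out, d)
  | sname :: rest, out, d =>
    match PySem.List.pop? (d.getD sname []) with
    | none => pvBLoop rest (out ++ [none]) d
    | some (v, q') => pvBLoop rest (out ++ [some v]) (d.insert sname q')

-- '[m if m is not None else next(leftovers, None) for m in ms]': fill the None slots
-- left to right from the leftover iterator, None once it is exhausted
def pvBFill : List (Option Int) → List Int → List (Option Int)
  | [], _ => []
  | none :: ms, c :: cs => some c :: pvBFill ms cs
  | none :: ms, [] => none :: pvBFill ms []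
  | some v :: ms, cs => some v :: pvBFill ms cs

def match_by_name_then_order_py_alt (snapshot_names : List String) (candidate_names : List String) : List (Option Int) :=
  let queues := pvBRev (pvBBuild candidate_names)
  let st := pvBLoop snapshot_names [] queues
  -- used = {m for m in ms if m is not None}: the set of the non-None entries
  let used : PySem.Set Int := PySem.Set.ofList (st.1.filterMap id)
  let leftovers := (PySem.List.pyRange 0 (candidate_names.length : Int) 1).filter
    (fun i => !(PySem.Set.contains used i))
  pvBFill st.1 leftovers

-- ===== PRECONDITION & SPEC =====
def Spec_match_by_name_then_order_py (snapshot_names : List String) (candidate_names : List String) (out : List (Option Int)) : Prop := out = match_by_name_then_order_py_alt snapshot_names candidate_names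
instance (snapshot_names : List String) (candidate_names : List String) (out : List (Option Int)) : Decidable (Spec_match_by_name_then_order_py snapshot_names candidate_names out) := by unfold Spec_match_by_name_then_order_py; infer_instance

-- ===== CLAIM (what is proved, stated in full; the proofs are below) =====
def Claim_equal_match_by_name_then_order_py : Prop := ∀ (snapshot_names : List String) (candidate_names : List String), Dom_match_by_name_then_order_py snapshot_names candidate_names → Spec_match_by_name_then_order_py snapshot_names candidate_names (match_by_name_then_order_py snapshot_names candidate_names)

-- ===== LEMMAS AND PROOFS =====

-- abbreviations used only by the proofs
def pvPred (cands : List String) (s : String) (i : Int) : Bool := PySem.List.pyGetD cands i "" == s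
def pvRange (cands : List String) : List Int := PySem.List.pyRange 0 (cands.length : Int) 1
def pvUnusedOf (cands : List String) (out : List (Option Int)) : List Int :=
  (pvRange cands).filter (fun i => !((out.filterMap id).contains i))

lemma pvRange_nodup (cands : List String) : (pvRange cands).Nodup := by
  rw [pvRange, show ((cands.length : Int)) = ((cands.length : Nat) : Int) from rfl, PySem.List.pyRange_zero_natCast]
  exact (List.nodup_range).map (fun a b h => by exact_mod_cast h)

lemma pvUnusedOf_nodup (cands : List String) (out : List (Option Int)) : (pvUnusedOf cands out).Nodup :=
  (pvRange_nodup cands).filter _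

lemma pvUnusedOf_nil (cands : List String) : pvUnusedOf cands [] = pvRange cands := by
  simp [pvUnusedOf]

lemma pvUnusedOf_append_none (cands : List String) (out : List (Option Int)) :
    pvUnusedOf cands (out ++ [none]) = pvUnusedOf cands out := by
  simp [pvUnusedOf]

lemma pvUnusedOf_append_some (cands : List String) (out : List (Option Int)) (i : Int) :
    pvUnusedOf cands (out ++ [some i]) = (pvUnusedOf cands out).filter (fun x => x != i) := by
  simp only [pvUnusedOf, List.filter_filter]
  refine List.filter_congr ?_
  intro x _
  simp [Bool.not_or, Bool.and_comm, bne, beq_eq_decide]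

lemma pvBBuild_getD (cands : List String) (s : String) :
    (pvBBuild cands).getD s [] = (pvRange cands).filter (pvPred cands s) := by
  have h1 : (pvBBuild cands).getD s []
      = ((((PySem.List.enumerate cands).map (fun p => (p.2, p.1))).foldl
          (fun (d : PySem.Dict String (List Int)) p => d.modify p.1 [] (· ++ [p.2]))
          PySem.Dict.empty)).getD s [] := by
    rw [List.foldl_map]; rfl
  rw [h1, PySem.Dict.getD_foldl_modify_append]
  rw [PySem.List.enumerate_eq_map_pyRange cands ""]
  simp [List.filter_map, List.map_map, Function.comp_def, pvRange, PySem.List.len]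
  rfl

lemma pvBBuild_keys_nodup (cands : List String) : (pvBBuild cands).keys.Nodup := by
  exact PySem.Dict.nodup_keys_foldl_modify_key (PySem.List.enumerate cands) (fun p => p.2) []
    (fun _ p => (· ++ [p.1])) PySem.Dict.empty (by simp [pysem])

lemma pvGet?_items (d : PySem.Dict String (List Int)) (k : String) :
    d.get? k = (d.items.find? (fun p => p.1 == k)).map (·.2) := by
  obtain ⟨its⟩ := d
  induction its with
  | nil => rfl
  | cons p rest ih =>
    obtain ⟨k0, v0⟩ := p
    rw [show ({ items := (k0, v0) :: rest } : PySem.Dict String (List Int)).items = (k0, v0) :: rest from rfl]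
    rw [PySem.Dict.get?_mk_cons, List.find?]
    by_cases h : k0 == k
    · simp [h]
    · simp only [h, if_neg, Bool.false_eq_true, not_false_iff]
      simpa using ih

lemma pvRevFold_get? : ∀ (pairs : List (String × List Int)) (acc : PySem.Dict String (List Int)),
    (pairs.map (·.1)).Nodup → ∀ k : String,
    (pairs.foldl (fun a p => a.insert p.1 p.2.reverse) acc).get? k =
      match pairs.find? (fun p => p.1 == k) with
      | some p => some p.2.reverse
      | none => acc.get? k := by
  intro pairs
  induction pairs with
  | nil => intro acc _ k; rfl
  | cons p rest ih =>
    intro acc hn k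
    obtain ⟨k0, v0⟩ := p
    simp only [List.map_cons, List.nodup_cons] at hn
    rw [List.foldl_cons, ih _ hn.2 k, List.find?]
    by_cases h : k0 == k
    · have hk : k = k0 := by simpa using (beq_iff_eq.mp h).symm
      subst hk
      have hfind : rest.find? (fun p => p.1 == k) = none := by
        rw [List.find?_eq_none]
        intro x hx
        simp only [beq_iff_eq]
        intro heq
        exact hn.1 (heq ▸ List.mem_map_of_mem hx)
      simp [h, hfind, PySem.Dict.get?_insert_self]
    · simp only [h, Bool.false_eq_true, if_neg, not_false_iff]
      cases hf : rest.find? (fun p => p.1 == k) with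
      | some q => simp
      | none =>
        simp only []
        exact PySem.Dict.get?_insert_of_ne acc v0.reverse (fun hkk => h (by simp [hkk]))

lemma pvRev_get? (d : PySem.Dict String (List Int)) (hn : d.keys.Nodup) (k : String) :
    (pvBRev d).get? k = (d.get? k).map List.reverse := by
  rw [pvBRev, pvRevFold_get? d.items _ hn k]
  cases hf : d.items.find? (fun p => p.1 == k) <;> simp [pvGet?_items, hf]

lemma pvInit_getD (cands : List String) (s : String) :
    (pvBRev (pvBBuild cands)).getD s [] = ((pvRange cands).filter (pvPred cands s)).reverse := by
  rw [PySem.Dict.getD_eq_get?_getD, pvRev_get? _ (pvBBuild_keys_nodup cands) s, ← pvBBuild_getD,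
    PySem.Dict.getD_eq_get?_getD]
  cases h : (pvBBuild cands).get? s <;> simp

lemma pvLoopEq (cands : List String) : ∀ (snaps : List String) (out : List (Option Int)) (d : PySem.Dict String (List Int)),
    (∀ s, d.getD s [] = ((pvUnusedOf cands out).filter (pvPred cands s)).reverse) →
    pvALoop cands snaps out.length (out ++ List.replicate snaps.length none) (pvUnusedOf cands out)
      = ((pvBLoop snaps out d).1, pvUnusedOf cands (pvBLoop snaps out d).1) := by
  intro snaps
  induction snaps with
  | nil => intro out d hd; simp [pvALoop, pvBLoop]
  | cons s rest ih =>
    intro out d hd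
    simp only [List.length_cons]
    have hq := hd s
    have hfind : (pvUnusedOf cands out).find? (fun ci => PySem.List.pyGetD cands ci "" == s)
        = ((pvUnusedOf cands out).filter (pvPred cands s)).head? := (List.head?_filter).symm
    cases hfq : (pvUnusedOf cands out).filter (pvPred cands s) with
    | nil =>
      have hpop : PySem.List.pop? (d.getD s []) = none := by rw [hq, hfq]; rfl
      rw [show pvBLoop (s :: rest) out d = pvBLoop rest (out ++ [none]) d by
        rw [pvBLoop]; rw [hpop]]
      rw [show pvALoop cands (s :: rest) out.length (out ++ List.replicate (rest.length + 1) none) (pvUnusedOf cands out)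
          = pvALoop cands rest (out.length + 1) (out ++ List.replicate (rest.length + 1) none) (pvUnusedOf cands out) by
        rw [pvALoop]; rw [hfind, hfq]; rfl]
      have h1 : out ++ List.replicate (rest.length + 1) none = (out ++ [none]) ++ List.replicate rest.length none := by
        simp [List.replicate_succ]
      have h2 : out.length + 1 = (out ++ [(none : Option Int)]).length := by simp
      rw [h1, h2, ← pvUnusedOf_append_none cands out]
      exact ih (out ++ [none]) d (by intro s'; rw [hd s', pvUnusedOf_append_none])
    | cons i t =>
      have hifilt : i ∈ (pvUnusedOf cands out).filter (pvPred cands s) := by rw [hfq]; exact List.mem_cons_self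
      have himem : i ∈ pvUnusedOf cands out := (List.mem_filter.mp hifilt).1
      have hipred : pvPred cands s i = true := (List.mem_filter.mp hifilt).2
      have hnd : ((pvUnusedOf cands out).filter (pvPred cands s)).Nodup := (pvUnusedOf_nodup cands out).filter _
      have hit : i ∉ t := by rw [hfq] at hnd; exact (List.nodup_cons.mp hnd).1
      -- B side step
      have hpop : PySem.List.pop? (d.getD s []) = some (i, t.reverse) := by
        rw [hq, hfq, List.reverse_cons, PySem.List.pop?_last]
      rw [show pvBLoop (s :: rest) out d = pvBLoop rest (out ++ [some i]) (d.insert s t.reverse) by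
        rw [pvBLoop]; rw [hpop]]
      -- A side step
      have hrem : (PySem.List.remove? (pvUnusedOf cands out) i).getD (pvUnusedOf cands out)
          = pvUnusedOf cands (out ++ [some i]) := by
        rw [PySem.List.remove?_eq_some_erase _ i himem, Option.getD_some,
          (pvUnusedOf_nodup cands out).erase_eq_filter i, pvUnusedOf_append_some]
      rw [show pvALoop cands (s :: rest) out.length (out ++ List.replicate (rest.length + 1) none) (pvUnusedOf cands out)
          = pvALoop cands rest (out.length + 1) ((out ++ List.replicate (rest.length + 1) none).set out.length (some i))
              (pvUnusedOf cands (out ++ [some i])) by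
        rw [pvALoop]; rw [hfind, hfq, List.head?_cons]; simp only [hrem]]
      have hset : (out ++ List.replicate (rest.length + 1) none).set out.length (some i)
          = (out ++ [some i]) ++ List.replicate rest.length none := by
        simp [List.replicate_succ]
      have h2 : out.length + 1 = (out ++ [some i]).length := by simp
      rw [hset, h2]
      refine ih (out ++ [some i]) (d.insert s t.reverse) ?_
      intro s'
      by_cases hss : s' = s
      · subst hss
        rw [PySem.Dict.getD_insert_self, pvUnusedOf_append_some, List.filter_comm, hfq]
        rw [List.filter_cons]
        simp only [bne_self_eq_false, Bool.false_eq_true, if_neg, not_false_iff]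
        rw [List.filter_eq_self.mpr (fun x hx => by simpa using (ne_of_mem_of_not_mem hx hit))]
      · rw [PySem.Dict.getD_insert_of_ne d t.reverse [] hss, hd s', pvUnusedOf_append_some,
          List.filter_comm]
        congr 1
        refine (List.filter_eq_self.mpr (fun x hx => ?_)).symm
        have hpx : pvPred cands s' x = true := (List.mem_filter.mp hx).2
        have hxi : x ≠ i := by
          intro hxe; subst hxe
          rw [pvPred] at hpx hipred
          exact hss (by rw [← beq_iff_eq.mp hpx, ← beq_iff_eq.mp hipred])
        simpa using hxi

def pvNoneIdx (m : List (Option Int)) : List Int :=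
  ((PySem.List.enumerate m).filter (fun p => p.2 == (none : Option Int))).map (·.1)

lemma pvEnumShift (m : List (Option Int)) : ∀ s : Int,
    PySem.List.enumerate m s = (PySem.List.enumerate m 0).map (fun p => (p.1 + s, p.2)) := by
  induction m with
  | nil => intro s; simp [pysem]
  | cons x t ih =>
    intro s
    rw [PySem.List.enumerate_cons, PySem.List.enumerate_cons, ih (s + 1)]
    simp only [zero_add, List.map_cons, ih 1, List.map_map]
    congr 1
    simp only [List.map_inj_left, Function.comp_apply, Prod.mk.injEq, Prod.forall]
    intro a b _
    exact ⟨by omega, trivial⟩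

lemma pvNoneIdx_cons (x : Option Int) (m : List (Option Int)) :
    pvNoneIdx (x :: m) = (if x = none then [(0:Int)] else []) ++ (pvNoneIdx m).map (· + 1) := by
  rw [pvNoneIdx, PySem.List.enumerate_cons]
  simp only [zero_add]
  rw [pvEnumShift m 1, List.filter_cons]
  by_cases hx : x = none
  · subst hx
    simp [pvNoneIdx, List.filter_map, List.map_map, Function.comp_def]
  · simp only [hx, if_neg]
    simp [pvNoneIdx, List.filter_map, List.map_map, Function.comp_def, hx]

lemma pvNoneIdx_nonneg (m : List (Option Int)) : ∀ i ∈ pvNoneIdx m, 0 ≤ i := by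
  induction m with
  | nil => intro i h; simp [pvNoneIdx, pysem] at h
  | cons x t ih =>
    intro i h
    rw [pvNoneIdx_cons] at h
    rcases List.mem_append.mp h with h1 | h2
    · split at h1 <;> simp_all
    · obtain ⟨j, hj, rfl⟩ := List.mem_map.mp h2
      have := ih j hj; omega

lemma pvBFill_nil : ∀ m : List (Option Int), pvBFill m [] = m := by
  intro m
  induction m with
  | nil => rfl
  | cons x t ih => cases x <;> simp [pvBFill, ih]

lemma pvShift (ids : List Int) (h : ∀ i ∈ ids, 0 ≤ i) : ∀ (cs : List Int) (a : Option Int) (t : List (Option Int)),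
    pvAScatter ((ids.map (· + 1)).zip cs) (a :: t) = a :: pvAScatter (ids.zip cs) t := by
  induction ids with
  | nil => intro cs a t; rfl
  | cons i ids' ih =>
    intro cs a t
    cases cs with
    | nil => rfl
    | cons c cs' =>
      have hi : 0 ≤ i := h i List.mem_cons_self
      have htn : (i + 1).toNat = i.toNat + 1 := by omega
      rw [List.map_cons, List.zip_cons_cons, pvAScatter, List.foldl_cons]
      simp only [htn, List.set_cons_succ]
      rw [List.zip_cons_cons, pvAScatter, List.foldl_cons]
      exact ih (fun j hj => h j (List.mem_cons_of_mem _ hj)) cs' a (t.set i.toNat (some c))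

lemma pvScatterEq : ∀ (m : List (Option Int)) (cs : List Int),
    pvAScatter ((pvNoneIdx m).zip cs) m = pvBFill m cs := by
  intro m
  induction m with
  | nil => intro cs; rfl
  | cons x t ih =>
    intro cs
    rw [pvNoneIdx_cons]
    cases x with
    | some v =>
      simp only [if_neg (by simp : ¬(some v = none)), List.nil_append]
      rw [pvShift _ (pvNoneIdx_nonneg t) cs (some v) t, ih cs, pvBFill]
    | none =>
      rw [if_pos rfl]
      cases cs with
      | nil => simp [pvBFill_nil, pvAScatter]
      | cons c cs' =>
        rw [List.cons_append, List.nil_append, List.zip_cons_cons, pvAScatter, List.foldl_cons]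
        simp only [Int.toNat_zero, List.set_cons_zero]
        show pvAScatter ((List.map (fun x => x + 1) (pvNoneIdx t)).zip cs') (some c :: t) = _
        rw [pvShift _ (pvNoneIdx_nonneg t) cs' (some c) t, ih cs', pvBFill]

lemma pvMain (snaps cands : List String) :
    match_by_name_then_order_py snaps cands = match_by_name_then_order_py_alt snaps cands := by
  rw [match_by_name_then_order_py, match_by_name_then_order_py_alt]
  have hinit : ∀ s, (pvBRev (pvBBuild cands)).getD s []
      = ((pvUnusedOf cands []).filter (pvPred cands s)).reverse := by
    intro s; rw [pvInit_getD, pvUnusedOf_nil]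
  have hA := pvLoopEq cands snaps [] (pvBRev (pvBBuild cands)) hinit
  simp only [pvUnusedOf_nil, List.nil_append, List.length_nil] at hA
  rw [pvRange] at hA
  rw [hA]
  simp only []
  have hleft : (PySem.List.pyRange 0 (cands.length : Int) 1).filter
        (fun i => !(PySem.Set.contains (PySem.Set.ofList (((pvBLoop snaps [] (pvBRev (pvBBuild cands))).1).filterMap id)) i))
      = pvUnusedOf cands (pvBLoop snaps [] (pvBRev (pvBBuild cands))).1 := by
    rw [pvUnusedOf, pvRange]
    exact List.filter_congr (fun x _ => by simp [pysem])
  rw [hleft]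
  rw [show ((PySem.List.enumerate (pvBLoop snaps [] (pvBRev (pvBBuild cands))).1).filter
      (fun p => p.2 == (none : Option Int))).map (·.1)
    = pvNoneIdx (pvBLoop snaps [] (pvBRev (pvBBuild cands))).1 from rfl]
  by_cases h : pvNoneIdx (pvBLoop snaps [] (pvBRev (pvBBuild cands))).1 = []
  · rw [if_pos h, ← pvScatterEq, h]
    rfl
  · rw [if_neg h, pvScatterEq]

-- ===== VERDICT (by name: the statement is the Claim_ definition above) =====
theorem match_by_name_then_order_py_spec : Claim_equal_match_by_name_then_order_py := by
  intro snaps cands _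
  show match_by_name_then_order_py snaps cands = match_by_name_then_order_py_alt snaps cands
  exact pvMain snaps cands
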